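-- pv_equiv track=rewrite | github.com/Azerojii/data_science | src/analysis_utils.py | infer_feature_groups
-- ===== SOURCE A (Python) =====
-- from typing import Dict, Iterable, Mapping, Sequence
--
-- def infer_feature_groups(columns: Sequence[str]) -> dict[str, list[str]]:
--     """
--     Group engineered features into semantic blocks for ablation experiments.
--     """
--     groups = {
--         "volatility_atr": [c for c in columns if "atr_" in c],
--         "macro_rates": [c for c in columns if "ten_year_yield" in c],
--         "sentiment": [c for c in columns if c.startswith("sent_") or "sentiment_momentum" in c],
--         "trend_momentum": [
--             c
--             for c in columns
--             if any(k in c for k in ("rsi_", "macd", "bb_", "ma_", "volume_z"))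
--         ],
--     }
--     return groups
-- ===== SOURCE B (Python) =====
-- KEYWORDS = ("atr_", "ten_year_yield", "sentiment_momentum", "rsi_", "macd", "bb_", "ma_", "volume_z")
-- # bit 8 = startswith("sent_"); group masks select which keyword bits count for a group
-- GROUP_MASKS = (
--     ("volatility_atr", 0b000000001),
--     ("macro_rates",    0b000000010),
--     ("sentiment",      0b100000100),
--     ("trend_momentum", 0b011111000),
-- )
--
-- def _mask(c):
--     m = 0
--     for i, k in enumerate(KEYWORDS):
--         if k in c:
--             m |= 1 << i
--     if c.startswith("sent_"):
--         m |= 1 << 8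
--     return m
--
-- def infer_feature_groups(columns):
--     masks = [_mask(c) for c in columns]
--     return {name: [c for c, m in zip(columns, masks) if m & gm]
--             for name, gm in GROUP_MASKS}
-- ===== Notes on version B (the rewrite author's own statement) =====
-- stated objective: alternative
-- what changed: B computes one integer bitmask of keyword/prefix hits per column in a single scan, then selects each group's columns by a bitwise AND against a per-group mask table, instead of A's four independent comprehension passes each re-testing substrings.
import Mathlib
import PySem

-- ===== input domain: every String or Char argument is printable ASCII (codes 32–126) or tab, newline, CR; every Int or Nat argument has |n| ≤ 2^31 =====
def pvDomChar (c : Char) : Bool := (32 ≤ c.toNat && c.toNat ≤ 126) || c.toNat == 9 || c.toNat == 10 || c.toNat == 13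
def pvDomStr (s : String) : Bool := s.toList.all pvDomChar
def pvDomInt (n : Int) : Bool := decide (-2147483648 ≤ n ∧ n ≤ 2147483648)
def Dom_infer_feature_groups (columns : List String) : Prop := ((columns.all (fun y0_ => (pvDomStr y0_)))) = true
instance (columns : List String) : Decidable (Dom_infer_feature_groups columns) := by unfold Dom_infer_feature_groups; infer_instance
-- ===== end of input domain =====

-- B replaces A's four per-group filter passes with a keyword-bitmask table: one pass computes
-- an integer mask of keyword hits per column, groups are then selected by bitwise AND (alternative).

-- ===== PORT A =====
def pvIsVol (c : String) : Bool := PySem.Str.isIn "atr_" c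
def pvIsMac (c : String) : Bool := PySem.Str.isIn "ten_year_yield" c
def pvIsSen (c : String) : Bool := PySem.Str.startswith c "sent_" || PySem.Str.isIn "sentiment_momentum" c
def pvIsTre (c : String) : Bool := ["rsi_", "macd", "bb_", "ma_", "volume_z"].any (fun k => PySem.Str.isIn k c)

def infer_feature_groups (columns : List String) : List (String × List String) :=
  [("volatility_atr", columns.filter pvIsVol),
   ("macro_rates", columns.filter pvIsMac),
   ("sentiment", columns.filter pvIsSen),
   ("trend_momentum", columns.filter pvIsTre)]

-- ===== PORT B =====
def pvKeywords : List String := ["atr_", "ten_year_yield", "sentiment_momentum", "rsi_", "macd", "bb_", "ma_", "volume_z"]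

def pvGroupMasks : List (String × Nat) :=
  [("volatility_atr", 1), ("macro_rates", 2), ("sentiment", 260), ("trend_momentum", 248)]

def pvMask (c : String) : Nat :=
  let m := (PySem.List.enumerate pvKeywords).foldl
    (fun m ik => if PySem.Str.isIn ik.2 c then m ||| (1 <<< ik.1.toNat) else m) 0
  if PySem.Str.startswith c "sent_" then m ||| (1 <<< 8) else m

def infer_feature_groups_alt (columns : List String) : List (String × List String) :=
  let masks := columns.map pvMask
  pvGroupMasks.map (fun ng =>
    (ng.1, ((columns.zip masks).filter (fun cm => (cm.2 &&& ng.2) != 0)).map (·.1)))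

-- ===== PRECONDITION & SPEC =====
def Spec_infer_feature_groups (columns : List String) (out : List (String × List String)) : Prop := out = infer_feature_groups_alt columns
instance (columns : List String) (out : List (String × List String)) : Decidable (Spec_infer_feature_groups columns out) := by unfold Spec_infer_feature_groups; infer_instance

-- ===== CLAIM (what is proved, stated in full; the proofs are below) =====
def Claim_equal_infer_feature_groups : Prop := ∀ (columns : List String), Dom_infer_feature_groups columns → Spec_infer_feature_groups columns (infer_feature_groups columns)

-- ===== LEMMAS AND PROOFS =====
theorem pv_zip_map_filter (f : String → Nat) (p : Nat → Bool) (columns : List String) :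
    ((columns.zip (columns.map f)).filter (fun cm => p cm.2)).map (·.1)
      = columns.filter (fun c => p (f c)) := by
  induction columns with
  | nil => rfl
  | cons x xs ih =>
    simp only [List.map_cons, List.zip_cons_cons, List.filter_cons]
    by_cases h : p (f x) <;> simp [h, ih]

theorem pv_ite_or (b : Bool) (m k : Nat) : (if b then m ||| k else m) = m ||| (if b then k else 0) := by
  cases b <;> simp

theorem pv_or_and (a b m : Nat) : (a ||| b) &&& m = (a &&& m) ||| (b &&& m) := by
  apply Nat.eq_of_testBit_eq; intro i
  simp [Nat.testBit_or, Nat.testBit_and, Bool.and_or_distrib_right]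

theorem pv_ite_and (b : Bool) (k m : Nat) : (if b then k else 0) &&& m = (if b then k &&& m else 0) := by
  cases b <;> simp

theorem pv_or_ne (x y : Nat) : ((x ||| y) != 0) = ((x != 0) || (y != 0)) := by
  rcases eq_or_ne x 0 with hx | hx
  · simp [hx]
  · have hxy : x ||| y ≠ 0 := by
      intro h
      apply hx
      apply Nat.eq_of_testBit_eq; intro i
      have := congrArg (fun n => n.testBit i) h
      simp [Nat.testBit_or] at this
      simp [this.1]
    have a1 : ((x ||| y) != 0) = true := bne_iff_ne.mpr hxy
    have a2 : ((x != 0)) = true := bne_iff_ne.mpr hx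
    simp [a1, a2]

theorem pv_ite_ne (b : Bool) (k : Nat) (h : k ≠ 0) : ((if b then k else 0) != 0) = b := by
  cases b <;> simp [h]

theorem pv_tn2 : (2:Int).toNat = 2 := rfl
theorem pv_tn3 : (3:Int).toNat = 3 := rfl
theorem pv_tn4 : (4:Int).toNat = 4 := rfl
theorem pv_tn5 : (5:Int).toNat = 5 := rfl
theorem pv_tn6 : (6:Int).toNat = 6 := rfl
theorem pv_tn7 : (7:Int).toNat = 7 := rfl

theorem pvMask_bit_vol (c : String) : ((pvMask c &&& 1) != 0) = pvIsVol c := by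
  simp only [pvMask, pvKeywords, PySem.List.enumerate_cons, PySem.List.enumerate_nil,
    List.foldl_cons, List.foldl_nil]
  simp only [pv_ite_or, Nat.zero_or]
  simp only [pv_or_and, pv_ite_and]
  simp [pv_or_ne, pv_ite_ne, pvIsVol, Bool.or_assoc, pv_tn2, pv_tn3, pv_tn4, pv_tn5, pv_tn6, pv_tn7]

theorem pvMask_bit_mac (c : String) : ((pvMask c &&& 2) != 0) = pvIsMac c := by
  simp only [pvMask, pvKeywords, PySem.List.enumerate_cons, PySem.List.enumerate_nil,
    List.foldl_cons, List.foldl_nil]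
  simp only [pv_ite_or, Nat.zero_or]
  simp only [pv_or_and, pv_ite_and]
  simp [pv_or_ne, pv_ite_ne, pvIsMac, Bool.or_assoc, pv_tn2, pv_tn3, pv_tn4, pv_tn5, pv_tn6, pv_tn7]

theorem pvMask_bit_sen (c : String) : ((pvMask c &&& 260) != 0) = pvIsSen c := by
  simp only [pvMask, pvKeywords, PySem.List.enumerate_cons, PySem.List.enumerate_nil,
    List.foldl_cons, List.foldl_nil]
  simp only [pv_ite_or, Nat.zero_or]
  simp only [pv_or_and, pv_ite_and]
  simp [pv_or_ne, pv_ite_ne, pvIsSen, Bool.or_assoc, pv_tn2, pv_tn3, pv_tn4, pv_tn5, pv_tn6, pv_tn7]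
  exact Bool.or_comm _ _

theorem pvMask_bit_tre (c : String) : ((pvMask c &&& 248) != 0) = pvIsTre c := by
  simp only [pvMask, pvKeywords, PySem.List.enumerate_cons, PySem.List.enumerate_nil,
    List.foldl_cons, List.foldl_nil]
  simp only [pv_ite_or, Nat.zero_or]
  simp only [pv_or_and, pv_ite_and]
  simp [pv_or_ne, pv_ite_ne, pvIsTre, Bool.or_assoc, pv_tn2, pv_tn3, pv_tn4, pv_tn5, pv_tn6, pv_tn7]

-- ===== VERDICT (by name: the statement is the Claim_ definition above) =====
theorem infer_feature_groups_spec : Claim_equal_infer_feature_groups := by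
  intro columns _
  unfold Spec_infer_feature_groups infer_feature_groups infer_feature_groups_alt
  have e1 := List.filter_congr (l := columns) (fun c _ => pvMask_bit_vol c)
  have e2 := List.filter_congr (l := columns) (fun c _ => pvMask_bit_mac c)
  have e3 := List.filter_congr (l := columns) (fun c _ => pvMask_bit_sen c)
  have e4 := List.filter_congr (l := columns) (fun c _ => pvMask_bit_tre c)
  simp only [pvGroupMasks, List.map_cons, List.map_nil,
    pv_zip_map_filter (f := pvMask) (p := fun m => (m &&& 1) != 0),
    pv_zip_map_filter (f := pvMask) (p := fun m => (m &&& 2) != 0),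
    pv_zip_map_filter (f := pvMask) (p := fun m => (m &&& 260) != 0),
    pv_zip_map_filter (f := pvMask) (p := fun m => (m &&& 248) != 0),
    e1, e2, e3, e4]
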